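-- pv_equiv track=rewrite | github.com/raka-gunarto/sirekap-investigate | sirekap-omr.py | get_votes
-- ===== SOURCE A (Python) =====
-- def get_votes(circle_rows, expected_rows, expected_columns):
--     if len(circle_rows) != expected_rows: return (None, "Incorrect no. of rows")
--     if any([len(row) != expected_columns for row in circle_rows]): return (None, "Incorrect no. of columns")
--
--     def index_with_default(iter, val, default=0):
--         try:
--             return iter.index(val)
--         except:
--             return default
--
--     candidate1 = ''.join([str(index_with_default(col, True)) for col in [[row[i][3] for row in circle_rows[0:10]] for i in range(expected_columns)]])
--     candidate2 = ''.join([str(index_with_default(col, True)) for col in [[row[i][3] for row in circle_rows[10:20]] for i in range(expected_columns)]])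
--     candidate3 = ''.join([str(index_with_default(col, True)) for col in [[row[i][3] for row in circle_rows[20:30]] for i in range(expected_columns)]])
--
--     return ([candidate1, candidate2, candidate3], None)
-- ===== SOURCE B (Python) =====
-- def get_votes(circle_rows, expected_rows, expected_columns):
--     if len(circle_rows) != expected_rows: return (None, "Incorrect no. of rows")
--     if any(len(row) != expected_columns for row in circle_rows): return (None, "Incorrect no. of columns")
--
--     candidates = []
--     for start in (0, 10, 20):
--         block = circle_rows[start:start + 10]
--         result = [0] * expected_columns
--         # walk the block rows back-to-front, overwriting: the last write for a
--         # column is its earliest True row, and untouched columns stay 0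
--         for r, row in reversed(list(enumerate(block))):
--             for i in range(expected_columns):
--                 if row[i][3]:
--                     result[i] = r
--         candidates.append(''.join(str(x) for x in result))
--     return (candidates, None)
-- ===== Notes on version B (the rewrite author's own statement) =====
-- stated objective: alternative
-- what changed: A transposes each 10-row block into per-column lists and calls .index(True) with a try/except default per column; B never transposes: it makes one row-major pass over each block in reverse row order, overwriting result[i] = r on every True cell, so the last write per column is its first True row and untouched columns keep 0.
import Mathlib
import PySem

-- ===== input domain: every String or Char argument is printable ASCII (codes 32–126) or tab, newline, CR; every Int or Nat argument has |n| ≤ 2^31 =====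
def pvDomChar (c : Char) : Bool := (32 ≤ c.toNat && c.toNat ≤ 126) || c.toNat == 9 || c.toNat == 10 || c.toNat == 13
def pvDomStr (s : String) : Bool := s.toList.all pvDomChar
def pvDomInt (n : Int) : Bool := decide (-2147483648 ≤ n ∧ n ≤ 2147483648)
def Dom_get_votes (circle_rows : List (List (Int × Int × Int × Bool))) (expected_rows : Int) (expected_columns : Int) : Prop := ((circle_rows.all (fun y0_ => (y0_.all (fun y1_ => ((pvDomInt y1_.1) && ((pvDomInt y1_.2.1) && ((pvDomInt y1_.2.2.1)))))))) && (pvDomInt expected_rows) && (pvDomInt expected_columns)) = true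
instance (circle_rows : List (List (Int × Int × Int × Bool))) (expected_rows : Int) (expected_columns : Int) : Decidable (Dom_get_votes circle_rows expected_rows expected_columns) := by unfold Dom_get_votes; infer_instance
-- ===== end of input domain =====

-- B replaces A's transpose-then-.index(True) per column by a single reversed row-major
-- overwrite pass per block with no transposed column lists (objective: alternative decomposition).

-- ===== PORT A =====
-- index_with_default(col, True): col.index raises ValueError when absent -> default 0
def gvIndexWithDefault (col : List Bool) (val : Bool) : Int :=
  match PySem.List.index? col val with
  | some k => (k : Int)
  | none => 0

-- row[i][3]: under A's column guard i is always in range, so the .getD default is never used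
def gvCell (row : List (Int × Int × Int × Bool)) (i : Int) : Bool :=
  ((PySem.List.pyGet? row i).getD (0, 0, 0, false)).2.2.2

-- one candidate string: transpose the block into columns, then .index(True) with default 0
def gvCand (expected_columns : Int) (block : List (List (Int × Int × Int × Bool))) : String :=
  PySem.Str.join ""
    (((PySem.List.pyRange 0 expected_columns 1).map
        (fun i => block.map (fun row => gvCell row i))).map
      (fun col => PySem.Int.toStr (gvIndexWithDefault col true)))

def get_votes (circle_rows : List (List (Int × Int × Int × Bool))) (expected_rows : Int) (expected_columns : Int) : Option (List String) × Option String :=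
  if (circle_rows.length : Int) ≠ expected_rows then (none, some "Incorrect no. of rows")
  else if circle_rows.any (fun row => decide ((row.length : Int) ≠ expected_columns)) then
    (none, some "Incorrect no. of columns")
  else
    let candidate1 := gvCand expected_columns (PySem.List.slice circle_rows (some 0) (some 10))
    let candidate2 := gvCand expected_columns (PySem.List.slice circle_rows (some 10) (some 20))
    let candidate3 := gvCand expected_columns (PySem.List.slice circle_rows (some 20) (some 30))
    (some [candidate1, candidate2, candidate3], none)

-- ===== PORT B =====
-- inner loop: for i in range(expected_columns): if row[i][3]: result[i] = r
def gvAltRow (expected_columns : Int) (r : Int) (row : List (Int × Int × Int × Bool)) (res : List Int) : List Int :=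
  (PySem.List.pyRange 0 expected_columns 1).foldl
    (fun res2 i => if gvCell row i then res2.set i.toNat r else res2) res

-- one candidate: result = [0]*n, then the reversed enumerate pass, then ''.join(str(x))
def gvAltBlock (expected_columns : Int) (block : List (List (Int × Int × Int × Bool))) : String :=
  let result := ((PySem.List.enumerate block 0).reverse).foldl
    (fun res p => gvAltRow expected_columns p.1 p.2 res)
    (List.replicate expected_columns.toNat 0)
  PySem.Str.join "" (result.map PySem.Int.toStr)

def get_votes_alt (circle_rows : List (List (Int × Int × Int × Bool))) (expected_rows : Int) (expected_columns : Int) : Option (List String) × Option String :=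
  if (circle_rows.length : Int) ≠ expected_rows then (none, some "Incorrect no. of rows")
  else if circle_rows.any (fun row => decide ((row.length : Int) ≠ expected_columns)) then
    (none, some "Incorrect no. of columns")
  else
    ([0, 10, 20].foldl
      (fun cands start =>
        cands ++ [gvAltBlock expected_columns (PySem.List.slice circle_rows (some start) (some (start + 10)))])
      [] |> some, none)

-- ===== PRECONDITION & SPEC =====
def Spec_get_votes (circle_rows : List (List (Int × Int × Int × Bool))) (expected_rows : Int) (expected_columns : Int) (out : Option (List String) × Option String) : Prop := out = get_votes_alt circle_rows expected_rows expected_columns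
instance (circle_rows : List (List (Int × Int × Int × Bool))) (expected_rows : Int) (expected_columns : Int) (out : Option (List String) × Option String) : Decidable (Spec_get_votes circle_rows expected_rows expected_columns out) := by unfold Spec_get_votes; infer_instance

-- ===== CLAIM (what is proved, stated in full; the proofs are below) =====
def Claim_equal_get_votes : Prop := ∀ (circle_rows : List (List (Int × Int × Int × Bool))) (expected_rows : Int) (expected_columns : Int), Dom_get_votes circle_rows expected_rows expected_columns → Spec_get_votes circle_rows expected_rows expected_columns (get_votes circle_rows expected_rows expected_columns)

-- ===== LEMMAS AND PROOFS =====

-- the inner loop over pyRange 0 ec 1, rebased onto List.range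
theorem gvAltRow_eq (ec r : Int) (row : List (Int × Int × Int × Bool)) (res : List Int) :
    gvAltRow ec r row res =
      (List.range ec.toNat).foldl
        (fun res2 (j : Nat) => if gvCell row (j : Int) = true then res2.set j r else res2) res := by
  unfold gvAltRow
  rw [PySem.List.pyRange_one, List.foldl_map]
  rw [show (ec - 0).toNat = ec.toNat by omega]
  refine PySem.List.foldl_congr_mem _ _ _ _ ?_
  intro acc j _
  simp only [zero_add, Int.toNat_natCast]

theorem gvSetFold_length (c : Nat → Bool) (r : Int) (n : Nat) (res : List Int) :
    ((List.range n).foldl (fun res2 (j : Nat) => if c j = true then res2.set j r else res2) res).length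
      = res.length := by
  induction n generalizing res with
  | zero => simp
  | succ n ih =>
    rw [List.range_succ, List.foldl_append]
    simp only [List.foldl_cons, List.foldl_nil]
    split <;> simp [ih]

theorem gvSetFold_getElem? (c : Nat → Bool) (r : Int) (n : Nat) (res : List Int) (k : Nat)
    (hk : k < res.length) :
    ((List.range n).foldl (fun res2 (j : Nat) => if c j = true then res2.set j r else res2) res)[k]? =
      some (if k < n ∧ c k = true then r else res[k]) := by
  induction n with
  | zero => simp [List.getElem?_eq_getElem hk]
  | succ n ih =>
    rw [List.range_succ, List.foldl_append]
    simp only [List.foldl_cons, List.foldl_nil]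
    have hlen := gvSetFold_length c r n res
    by_cases hcn : c n = true
    · rw [if_pos hcn, List.getElem?_set]
      by_cases hkn : n = k
      · subst hkn
        rw [if_pos rfl, if_pos (hlen ▸ hk), if_pos ⟨Nat.lt_succ_self n, hcn⟩]
      · rw [if_neg hkn, ih]
        have heq : (k < n + 1 ∧ c k = true) ↔ (k < n ∧ c k = true) := by
          constructor <;> rintro ⟨h1, h2⟩ <;> exact ⟨by omega, h2⟩
        simp only [heq]
    · rw [if_neg hcn, ih]
      have heq : (k < n + 1 ∧ c k = true) ↔ (k < n ∧ c k = true) := by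
        constructor <;> rintro ⟨h1, h2⟩
        · refine ⟨?_, h2⟩
          rcases Nat.lt_succ_iff_lt_or_eq.mp h1 with h | h
          · exact h
          · subst h; exact absurd h2 hcn
        · exact ⟨by omega, h2⟩
      simp only [heq]

theorem gvFoldr_length (ec : Int) (block : List (List (Int × Int × Int × Bool))) (s : Int)
    (res : List Int) :
    ((PySem.List.enumerate block s).foldr (fun p acc => gvAltRow ec p.1 p.2 acc) res).length
      = res.length := by
  induction block generalizing s with
  | nil => simp [PySem.List.enumerate_nil]
  | cons x xs ih =>
    rw [PySem.List.enumerate_cons]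
    simp only [List.foldr_cons]
    rw [gvAltRow_eq, gvSetFold_length, ih]

theorem gvFoldr_getElem? (ec : Int) (block : List (List (Int × Int × Int × Bool))) (s : Int)
    (res : List Int) (k : Nat) (hk : k < ec.toNat) (hkr : k < res.length) :
    ((PySem.List.enumerate block s).foldr (fun p acc => gvAltRow ec p.1 p.2 acc) res)[k]? =
      some (match PySem.List.index? (block.map (fun row => gvCell row (k : Int))) true with
            | some m => s + (m : Int)
            | none => res[k]) := by
  induction block generalizing s with
  | nil =>
    simp only [PySem.List.enumerate_nil, List.foldr_nil, List.map_nil]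
    simp [PySem.List.index?_eq_idxOf?, List.getElem?_eq_getElem hkr]
  | cons x xs ih =>
    rw [PySem.List.enumerate_cons]
    simp only [List.foldr_cons]
    have hrl : k < ((PySem.List.enumerate xs (s + 1)).foldr
        (fun p acc => gvAltRow ec p.1 p.2 acc) res).length := by
      rw [gvFoldr_length]; exact hkr
    rw [gvAltRow_eq, gvSetFold_getElem? _ _ _ _ k hrl]
    have hrest := ih (s + 1)
    rw [List.getElem?_eq_getElem hrl] at hrest
    have hrestk := Option.some.inj hrest
    rw [List.map_cons, hrestk]
    by_cases hx : gvCell x (k : Int) = true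
    · rw [hx, PySem.List.index?_cons_self, if_pos ⟨hk, rfl⟩]
      simp
    · have hne : gvCell x (k : Int) ≠ true := hx
      rw [PySem.List.index?_cons_of_ne _ hne, if_neg (by simp [hx])]
      cases hidx : PySem.List.index? (xs.map (fun row => gvCell row (k : Int))) true with
      | none => simp
      | some m =>
        simp only [Option.map_some]
        congr 1
        push_cast
        ring

theorem gvBlock_eq (ec : Int) (block : List (List (Int × Int × Int × Bool))) :
    gvCand ec block = gvAltBlock ec block := by
  unfold gvCand gvAltBlock
  rw [List.foldl_reverse]
  congr 1
  rw [List.map_map]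
  apply List.ext_getElem?
  intro k
  by_cases hk : k < ec.toNat
  · have hkr : k < (List.replicate ec.toNat (0 : Int)).length := by
      simpa using hk
    rw [List.getElem?_map, List.getElem?_map]
    rw [gvFoldr_getElem? ec block 0 _ k hk hkr]
    rw [PySem.List.getElem?_pyRange_one]
    rw [if_pos (by omega : k < (ec - 0).toNat)]
    simp only [Option.map_some, Function.comp, zero_add]
    congr 1
    unfold gvIndexWithDefault
    cases hidx : PySem.List.index? (block.map (fun row => gvCell row (k : Int))) true with
    | none => simp [List.getElem_replicate]
    | some m => simp
  · have h1 : ((PySem.List.pyRange 0 ec 1).map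
        (fun i => PySem.Int.toStr (gvIndexWithDefault (block.map fun row => gvCell row i) true)))[k]? = none := by
      rw [List.getElem?_eq_none_iff]
      rw [List.length_map, PySem.List.length_pyRange_one]
      omega
    have h2 : (((PySem.List.enumerate block 0).foldr (fun p acc => gvAltRow ec p.1 p.2 acc)
        (List.replicate ec.toNat 0)).map PySem.Int.toStr)[k]? = none := by
      rw [List.getElem?_eq_none_iff]
      rw [List.length_map, gvFoldr_length]
      simpa using hk
    rw [h2, ← h1]
    rfl

-- ===== VERDICT (by name: the statement is the Claim_ definition above) =====
theorem get_votes_spec : Claim_equal_get_votes := by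
  intro circle_rows expected_rows expected_columns _
  show _ = _
  unfold get_votes get_votes_alt
  split
  · rfl
  · split
    · rfl
    · simp [List.foldl, gvBlock_eq]
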